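-- pv_equiv track=rewrite | github.com/braden-morrison/CSCE-110 | lab4/barcode.py | barcode
-- ===== SOURCE A (Python) =====
-- def barcode(C, rows, cols):
--     code = '|'
--     for x in range(cols):
--         val = 0
--         for y in range(rows):
--             val += C[y][x]
--         code += str(val) + '|'
--     return code
-- ===== SOURCE B (Python) =====
-- def barcode(C, rows, cols):
--     totals = [0] * cols
--     if totals:  # no columns -> nothing to accumulate
--         for y in range(rows):
--             for x in range(cols):
--                 totals[x] += C[y][x]
--     return '|' + ''.join(str(t) + '|' for t in totals)
-- ===== Notes on version B (the rewrite author's own statement) =====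
-- stated objective: alternative
-- what changed: B accumulates all column sums simultaneously in one row-major pass over an array of totals, then renders the string with a single join, instead of A's column-major nested loops that finish one column (and append to the string) at a time.
import Mathlib
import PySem

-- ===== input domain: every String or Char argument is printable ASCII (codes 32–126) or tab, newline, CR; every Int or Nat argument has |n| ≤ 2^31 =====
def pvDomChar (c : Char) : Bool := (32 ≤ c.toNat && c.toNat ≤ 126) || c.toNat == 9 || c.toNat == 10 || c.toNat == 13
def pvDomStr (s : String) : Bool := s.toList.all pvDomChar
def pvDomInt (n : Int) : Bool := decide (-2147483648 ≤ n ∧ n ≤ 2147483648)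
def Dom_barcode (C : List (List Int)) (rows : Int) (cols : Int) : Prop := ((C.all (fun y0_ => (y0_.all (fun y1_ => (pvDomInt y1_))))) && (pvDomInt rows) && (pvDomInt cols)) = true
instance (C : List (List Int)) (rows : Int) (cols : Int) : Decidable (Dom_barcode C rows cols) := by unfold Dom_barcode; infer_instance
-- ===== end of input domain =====

-- B replaces A's column-major nested loops (one column summed, then appended to the string)
-- by a single row-major pass accumulating all column totals at once, then one join to build
-- the string (objective: alternative decomposition, same cost).

-- ===== PORT A =====
-- literal port of A: code = '|'; for x in range(cols): val = 0; for y in range(rows): val += C[y][x]; code += str(val)+'|'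
-- (C[y][x] via pyGetD: the default is never read inside Pre_barcode, where Python does not raise)
def barcode (C : List (List Int)) (rows : Int) (cols : Int) : String :=
  (PySem.List.pyRange 0 cols 1).foldl
    (fun code x =>
      code ++ PySem.Int.toStr
        ((PySem.List.pyRange 0 rows 1).foldl
          (fun val y => val + PySem.List.pyGetD (PySem.List.pyGetD C y []) x 0) 0) ++ "|")
    "|"

-- ===== PORT B =====
-- literal port of Source B: totals = [0]*cols; if totals: (for y in range(rows): for x in range(cols): totals[x] += C[y][x]);
-- return '|' + ''.join(str(t)+'|' for t in totals)  (totals inlined; the 'if totals:' guard is the replicate-nonempty test)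
def barcode_alt (C : List (List Int)) (rows : Int) (cols : Int) : String :=
  "|" ++ PySem.Str.join ""
    ((if List.replicate cols.toNat (0:Int) = [] then List.replicate cols.toNat (0:Int)
      else (PySem.List.pyRange 0 rows 1).foldl
        (fun t y =>
          (PySem.List.pyRange 0 cols 1).foldl
            (fun t x =>
              t.set x.toNat (PySem.List.pyGetD t x 0 + PySem.List.pyGetD (PySem.List.pyGetD C y []) x 0))
            t)
        (List.replicate cols.toNat 0)).map (fun t => PySem.Int.toStr t ++ "|"))

-- ===== PRECONDITION & SPEC =====
-- Pre_ excludes exactly the inputs on which Python A raises IndexError: when both loops run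
-- (0 < rows and 0 < cols) every accessed row C[y] (y < rows) must exist and have at least cols entries.
def Pre_barcode (C : List (List Int)) (rows : Int) (cols : Int) : Prop :=
  (0 < rows ∧ 0 < cols) → (rows ≤ (C.length : Int) ∧ ∀ r ∈ C.take rows.toNat, cols ≤ (r.length : Int))
instance (C : List (List Int)) (rows : Int) (cols : Int) : Decidable (Pre_barcode C rows cols) := by
  unfold Pre_barcode; infer_instance

def pvWitness_barcode : List (List Int) × Int × Int := ([[1, 2], [3, 4]], 2, 2)

def Spec_barcode (C : List (List Int)) (rows : Int) (cols : Int) (out : String) : Prop := out = barcode_alt C rows cols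
instance (C : List (List Int)) (rows : Int) (cols : Int) (out : String) : Decidable (Spec_barcode C rows cols out) := by unfold Spec_barcode; infer_instance

-- ===== CLAIM (what is proved, stated in full; the proofs are below) =====
def Claim_equal_barcode : Prop := ∀ (C : List (List Int)) (rows : Int) (cols : Int), Dom_barcode C rows cols → Pre_barcode C rows cols → Spec_barcode C rows cols (barcode C rows cols)

-- ===== LEMMAS AND PROOFS =====

-- getD over set, expressed the way the loop proofs need it
theorem pvGetDSetNe (l : List Int) (i k : Nat) (v d : Int) (h : i ≠ k) :
    (l.set i v).getD k d = l.getD k d := by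
  simp [List.getD_eq_getElem?_getD, List.getElem?_set_ne h]

theorem pvGetDSetSelf (l : List Int) (i : Nat) (v d : Int) (h : i < l.length) :
    (l.set i v).getD i d = v := by
  simp [List.getD_eq_getElem?_getD, h]

-- ''.join of a cons, on the String level
theorem pvJoinEmptyCons (s : String) (rest : List String) :
    PySem.Str.join "" (s :: rest) = s ++ PySem.Str.join "" rest := by
  apply String.toList_inj.mp
  simp [PySem.Str.toList_join, PySem.Chars.join, List.intercalate]
  cases rest <;> simp

-- A's string-building foldl is init ++ ''.join(map ...)
theorem pvFoldlStr (l : List Int) (f : Int → String) (init : String) :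
    l.foldl (fun s x => s ++ f x ++ "|") init
      = init ++ PySem.Str.join "" (l.map (fun x => f x ++ "|")) := by
  induction l generalizing init with
  | nil =>
      apply String.toList_inj.mp
      simp [PySem.Str.toList_join, PySem.Chars.join, List.intercalate]
  | cons a t ih =>
      rw [List.foldl_cons, ih, List.map_cons, pvJoinEmptyCons]
      simp [String.append_assoc]

-- B's inner loop (one row y): every slot k < c gets h k added, slots beyond are untouched
theorem pvInnerFold (h : Int → Int) (c : Nat) (t : List Int) (hc : c ≤ t.length) :
    ((PySem.List.pyRange 0 (c : Int) 1).foldl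
        (fun t x => t.set x.toNat (PySem.List.pyGetD t x 0 + h x)) t).length = t.length ∧
    ∀ k : Nat,
      ((PySem.List.pyRange 0 (c : Int) 1).foldl
          (fun t x => t.set x.toNat (PySem.List.pyGetD t x 0 + h x)) t).getD k 0
        = if k < c then t.getD k 0 + h k else t.getD k 0 := by
  induction c with
  | zero => simp [PySem.List.pyRange_one_eq_nil (by omega : (0:Int) ≤ 0)]
  | succ c ih =>
      have hsplit : PySem.List.pyRange 0 ((c : Int) + 1) 1
          = PySem.List.pyRange 0 (c : Int) 1 ++ [(c : Int)] :=
        PySem.List.pyRange_one_succ_right (by positivity)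
      push_cast
      rw [hsplit, List.foldl_append]
      simp only [List.foldl_cons, List.foldl_nil]
      obtain ⟨hl, hg⟩ := ih (by omega)
      have hcl : c < (((PySem.List.pyRange 0 (c : Int) 1).foldl
          (fun t x => t.set x.toNat (PySem.List.pyGetD t x 0 + h x)) t)).length := by omega
      constructor
      · simp [hl]
      · intro k
        rcases Nat.lt_trichotomy k c with hk | hk | hk
        · rw [Int.toNat_natCast, pvGetDSetNe _ _ _ _ _ (by omega), hg k,
              if_pos hk, if_pos (by omega)]
        · subst hk
          rw [Int.toNat_natCast, pvGetDSetSelf _ _ _ _ hcl, if_pos (by omega),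
              PySem.List.pyGetD_natCast, hg k, if_neg (by omega)]
        · rw [Int.toNat_natCast, pvGetDSetNe _ _ _ _ _ (by omega), hg k,
              if_neg (by omega), if_neg (by omega)]

-- B's outer loop: slot k accumulates the column-k contributions of the processed rows, in order
theorem pvOuterFold (g : Int → Int → Int) (c : Nat) (ys : List Int) (t : List Int)
    (ht : t.length = c) :
    (ys.foldl
        (fun t y =>
          (PySem.List.pyRange 0 (c : Int) 1).foldl
            (fun t x => t.set x.toNat (PySem.List.pyGetD t x 0 + g y x)) t) t).length = c ∧
    ∀ k : Nat, k < c →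
      (ys.foldl
          (fun t y =>
            (PySem.List.pyRange 0 (c : Int) 1).foldl
              (fun t x => t.set x.toNat (PySem.List.pyGetD t x 0 + g y x)) t) t).getD k 0
        = t.getD k 0 + (ys.map (fun y => g y (k : Int))).sum := by
  induction ys generalizing t with
  | nil => simp [ht]
  | cons y ys ih =>
      simp only [List.foldl_cons, List.map_cons, List.sum_cons]
      obtain ⟨hl, hg⟩ := pvInnerFold (g y) c t (by omega)
      obtain ⟨hl', hg'⟩ := ih _ (hl.trans ht)
      refine ⟨hl', fun k hk => ?_⟩
      rw [hg' k hk, hg k, if_pos hk, add_assoc]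

-- pyRange 0 b 1 only depends on b.toNat
theorem pvRangeToNat (b : Int) : PySem.List.pyRange 0 b 1 = PySem.List.pyRange 0 (b.toNat : Int) 1 := by
  rcases le_or_gt b 0 with hb | hb
  · rw [PySem.List.pyRange_one_eq_nil hb, PySem.List.pyRange_one_eq_nil (by omega)]
  · rw [Int.toNat_of_nonneg (le_of_lt hb)]

-- totals without the guard, as a list, is the per-column sums in column order
theorem pvTotalsEq (C : List (List Int)) (rows : Int) (cols : Int) :
    ((PySem.List.pyRange 0 rows 1).foldl
      (fun t y =>
        (PySem.List.pyRange 0 cols 1).foldl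
          (fun t x =>
            t.set x.toNat (PySem.List.pyGetD t x 0 + PySem.List.pyGetD (PySem.List.pyGetD C y []) x 0))
          t)
      (List.replicate cols.toNat 0))
    = (PySem.List.pyRange 0 cols 1).map
        (fun x => ((PySem.List.pyRange 0 rows 1).map
          (fun y => PySem.List.pyGetD (PySem.List.pyGetD C y []) x 0)).sum) := by
  rw [pvRangeToNat cols]
  obtain ⟨hl, hg⟩ := pvOuterFold (fun y x => PySem.List.pyGetD (PySem.List.pyGetD C y []) x 0)
    cols.toNat (PySem.List.pyRange 0 rows 1) (List.replicate cols.toNat 0) (by simp)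
  apply List.ext_getElem
  · rw [hl, List.length_map, PySem.List.length_pyRange_one]
    omega
  · intro k hk1 hk2
    have hkc : k < cols.toNat := by
      rw [List.length_map, PySem.List.length_pyRange_one] at hk2
      omega
    rw [← List.getD_eq_getElem _ 0 hk1, hg k hkc]
    have hkr : k < (PySem.List.pyRange 0 (cols.toNat : Int) 1).length := by
      rw [PySem.List.length_pyRange_one]; omega
    rw [List.getElem_map, PySem.List.getElem_pyRange_one _ _ _ hkr]
    simp

-- totals (with B's empty-guard), as a list, is the per-column sums in column order
theorem pvTotalsEqIf (C : List (List Int)) (rows : Int) (cols : Int) :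
    (if List.replicate cols.toNat (0:Int) = [] then List.replicate cols.toNat (0:Int)
     else (PySem.List.pyRange 0 rows 1).foldl
      (fun t y =>
        (PySem.List.pyRange 0 cols 1).foldl
          (fun t x =>
            t.set x.toNat (PySem.List.pyGetD t x 0 + PySem.List.pyGetD (PySem.List.pyGetD C y []) x 0))
          t)
      (List.replicate cols.toNat 0))
    = (PySem.List.pyRange 0 cols 1).map
        (fun x => ((PySem.List.pyRange 0 rows 1).map
          (fun y => PySem.List.pyGetD (PySem.List.pyGetD C y []) x 0)).sum) := by
  by_cases hrep : List.replicate cols.toNat (0:Int) = []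
  · rw [if_pos hrep, hrep, PySem.List.pyRange_one_eq_nil (by
      simpa [List.replicate_eq_nil_iff] using hrep : cols ≤ 0), List.map_nil]
  · rw [if_neg hrep]
    exact pvTotalsEq C rows cols

-- ===== VERDICT (by name: the statement is the Claim_ definition above) =====
theorem barcode_spec : Claim_equal_barcode := by
  intro C rows cols _ _
  unfold Spec_barcode barcode barcode_alt
  rw [pvTotalsEqIf, List.map_map]
  have hval : ∀ x : Int,
      (PySem.List.pyRange 0 rows 1).foldl
          (fun val y => val + PySem.List.pyGetD (PySem.List.pyGetD C y []) x 0) 0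
        = ((PySem.List.pyRange 0 rows 1).map
            (fun y => PySem.List.pyGetD (PySem.List.pyGetD C y []) x 0)).sum := by
    intro x
    rw [PySem.List.foldl_add]
    ring_nf
  calc (PySem.List.pyRange 0 cols 1).foldl
        (fun code x =>
          code ++ PySem.Int.toStr
            ((PySem.List.pyRange 0 rows 1).foldl
              (fun val y => val + PySem.List.pyGetD (PySem.List.pyGetD C y []) x 0) 0) ++ "|") "|"
      = (PySem.List.pyRange 0 cols 1).foldl
          (fun code x =>
            code ++ PySem.Int.toStr
              (((PySem.List.pyRange 0 rows 1).map
                (fun y => PySem.List.pyGetD (PySem.List.pyGetD C y []) x 0)).sum) ++ "|") "|" := by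
        simp only [hval]
    _ = _ := pvFoldlStr _ _ _
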